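-- pv_equiv track=rewrite | github.com/amos-maganyane/document-parser-private | main.py | _parse_certifications
-- ===== SOURCE A (Python) =====
-- from typing import Dict, Any, List, Optional
--
-- def _parse_certifications(text: str) -> List[str]:
--     """Parse certifications section into list of certifications"""
--     if not text:
--         return []
--
--     certifications = []
--     current_cert = []
--
--     lines = text.split('\n')
--     for line in lines:
--         line = line.strip()
--         if not line:
--             if current_cert:
--                 certifications.append(" ".join(current_cert))
--                 current_cert = []
--             continue
--
--         if any(keyword in line.lower() for keyword in [
--             "certification", "certificate", "certified",
--             "license", "credential"
--         ]):
--             if current_cert: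
--                 certifications.append(" ".join(current_cert))
--             current_cert = [line]
--         elif current_cert:
--             current_cert.append(line)
--
--     # Add final certification
--     if current_cert:
--         certifications.append(" ".join(current_cert))
--
--     return certifications
-- ===== SOURCE B (Python) =====
-- def _is_cert_heading(line):
--     low = line.lower()
--     return any(k in low for k in (
--         "certification", "certificate", "certified",
--         "license", "credential"))
--
--
-- def _parse_certifications(text):
--     """Parse certifications section into list of certifications"""
--     lines = [ln.strip() for ln in text.split('\n')]
--     result = []
--     i, n = 0, len(lines)
--     while i < n:
--         ln = lines[i]
--         i += 1
--         if ln and _is_cert_heading(ln):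
--             group = [ln]
--             while i < n and lines[i] and not _is_cert_heading(lines[i]):
--                 group.append(lines[i])
--                 i += 1
--             result.append(" ".join(group))
--     return result
-- ===== Notes on version B (the rewrite author's own statement) =====
-- stated objective: alternative
-- what changed: Replaces A's mutable accumulator with flush-on-blank/flush-on-keyword logic by a two-phase scanner: strip all lines once, then an index loop that on each keyword line greedily consumes the following run of non-blank non-keyword lines as one group.
import Mathlib
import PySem

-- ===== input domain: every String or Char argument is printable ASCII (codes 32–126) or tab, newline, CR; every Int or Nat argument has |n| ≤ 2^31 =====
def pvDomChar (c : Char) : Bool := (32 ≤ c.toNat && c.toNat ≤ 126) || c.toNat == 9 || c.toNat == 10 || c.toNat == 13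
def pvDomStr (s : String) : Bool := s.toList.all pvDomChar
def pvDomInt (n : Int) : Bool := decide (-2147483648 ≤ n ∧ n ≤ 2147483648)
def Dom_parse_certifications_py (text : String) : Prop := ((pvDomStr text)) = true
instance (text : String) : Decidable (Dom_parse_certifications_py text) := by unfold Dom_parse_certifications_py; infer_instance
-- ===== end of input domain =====

-- B restructures A's parse (accumulator with flush-on-blank/flush-on-keyword) as a two-phase
-- scanner: strip all lines, then on each keyword line take the run of following non-blank
-- non-keyword lines as one group; same cost, different decomposition.

-- ===== PORT A =====
-- text.split('\n') (sep is the literal nonempty "\n", so Python's str.split = Chars.splitOn)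
def pvSplitNl (text : String) : List String :=
  (PySem.Chars.splitOn text.toList ['\n']).map String.ofList

-- the keyword list and the `any(keyword in line.lower() for keyword in …)` test (shared verbatim by both Pythons)
def pvKeywords : List String :=
  ["certification", "certificate", "certified", "license", "credential"]

def pvHasKeyword (line : String) : Bool :=
  pvKeywords.any (fun k => PySem.Str.isIn k (PySem.Str.lower line))

-- one iteration of A's `for line in lines` loop; state = (certifications, current_cert)
def pvStepA (st : List String × List String) (line : String) : List String × List String :=
  let line := PySem.Str.strip line
  if line = "" then
    if st.2 ≠ [] then (st.1 ++ [PySem.Str.join " " st.2], []) else st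
  else if pvHasKeyword line then
    (if st.2 ≠ [] then st.1 ++ [PySem.Str.join " " st.2] else st.1, [line])
  else if st.2 ≠ [] then (st.1, st.2 ++ [line])
  else st

-- the final `if current_cert: certifications.append(...)`
def pvFinishA (st : List String × List String) : List String :=
  if st.2 ≠ [] then st.1 ++ [PySem.Str.join " " st.2] else st.1

def parse_certifications_py (text : String) : List String :=
  if text = "" then []
  else pvFinishA ((pvSplitNl text).foldl pvStepA ([], []))

-- ===== PORT B =====
-- Source B's inner-while predicate: a stripped line that continues the current group
def pvCont (s : String) : Bool := s ≠ "" && !pvHasKeyword s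

-- Source B's outer while loop: advance until a keyword line, then consume the run after it
def pvScanB : List String → List String
  | [] => []
  | ln :: rest =>
    if ln ≠ "" ∧ pvHasKeyword ln then
      PySem.Str.join " " (ln :: rest.takeWhile pvCont) :: pvScanB (rest.dropWhile pvCont)
    else pvScanB rest
termination_by ls => ls.length
decreasing_by
  · exact Nat.lt_succ_of_le (List.length_dropWhile_le _ _)
  · exact Nat.lt_succ_of_le (Nat.le_refl _)

def parse_certifications_py_alt (text : String) : List String :=
  pvScanB ((pvSplitNl text).map PySem.Str.strip)

-- ===== PRECONDITION & SPEC =====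
def Spec_parse_certifications_py (text : String) (out : List String) : Prop := out = parse_certifications_py_alt text
instance (text : String) (out : List String) : Decidable (Spec_parse_certifications_py text out) := by unfold Spec_parse_certifications_py; infer_instance

-- ===== CLAIM (what is proved, stated in full; the proofs are below) =====
def Claim_equal_parse_certifications_py : Prop := ∀ (text : String), Dom_parse_certifications_py text → Spec_parse_certifications_py text (parse_certifications_py text)

-- ===== LEMMAS AND PROOFS =====

-- The loop invariant relating A's fold state to B's scanner.
theorem pvMain (ls : List String) : ∀ (certs cur : List String),
    pvFinishA (ls.foldl pvStepA (certs, cur)) =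
      certs ++ (match cur with
        | [] => pvScanB (ls.map PySem.Str.strip)
        | _ => PySem.Str.join " " (cur ++ (ls.map PySem.Str.strip).takeWhile pvCont) ::
               pvScanB ((ls.map PySem.Str.strip).dropWhile pvCont)) := by
  induction ls with
  | nil =>
    intro certs cur
    cases cur with
    | nil => simp [pvFinishA, pvScanB]
    | cons a t => simp [pvFinishA, pvScanB]
  | cons l tl ih =>
    intro certs cur
    simp only [List.foldl_cons, List.map_cons]
    by_cases h0 : PySem.Str.strip l = ""
    · cases cur with
      | nil =>
        rw [show pvStepA (certs, []) l = (certs, []) by simp [pvStepA, h0]]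
        rw [ih certs []]
        simp [pvScanB, h0]
      | cons a t =>
        rw [show pvStepA (certs, a :: t) l = (certs ++ [PySem.Str.join " " (a :: t)], []) by
          simp [pvStepA, h0]]
        rw [ih]
        rw [h0]
        have hc : pvCont "" = false := by simp [pvCont]
        simp [pvScanB, hc]
    · by_cases hk : pvHasKeyword (PySem.Str.strip l) = true
      · cases cur with
        | nil =>
          rw [show pvStepA (certs, []) l = (certs, [PySem.Str.strip l]) by
            simp [pvStepA, h0, hk]]
          rw [ih]
          simp [pvScanB, h0, hk]
        | cons a t =>
          rw [show pvStepA (certs, a :: t) l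
              = (certs ++ [PySem.Str.join " " (a :: t)], [PySem.Str.strip l]) by
            simp [pvStepA, h0, hk]]
          rw [ih]
          have hc : pvCont (PySem.Str.strip l) = false := by simp [pvCont, hk]
          simp [pvScanB, h0, hk, hc, List.takeWhile, List.dropWhile]
      · have hc : pvCont (PySem.Str.strip l) = true := by simp [pvCont, h0, hk]
        cases cur with
        | nil =>
          rw [show pvStepA (certs, []) l = (certs, []) by simp [pvStepA, h0, hk]]
          rw [ih certs []]
          simp [pvScanB, h0, hk]
        | cons a t =>
          rw [show pvStepA (certs, a :: t) l = (certs, (a :: t) ++ [PySem.Str.strip l]) by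
            simp [pvStepA, h0, hk]]
          rw [ih]
          simp [List.takeWhile, List.dropWhile, hc]

-- ===== VERDICT (by name: the statement is the Claim_ definition above) =====
theorem parse_certifications_py_spec : Claim_equal_parse_certifications_py := by
  intro text _
  unfold Spec_parse_certifications_py parse_certifications_py parse_certifications_py_alt
  by_cases h : text = ""
  · subst h
    have h1 : pvSplitNl "" = [""] := rfl
    have h2 : PySem.Str.strip "" = "" := rfl
    simp [h1, h2, pvScanB]
  · rw [if_neg h, pvMain]
    rfl
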